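-- pv_equiv track=rewrite | github.com/tvlad245-boop/tattoo_studio_bot | tattoo_studio_bot/utils/calendar_kb.py | _shift_month
-- ===== SOURCE A (Python) =====
-- def _shift_month(year: int, month: int, delta: int) -> str:
--     m = month + delta
--     y = year
--     while m <= 0:
--         m += 12
--         y -= 1
--     while m > 12:
--         m -= 12
--         y += 1
--     return f"{y}{m:02d}"
-- ===== SOURCE B (Python) =====
-- def _shift_month(year: int, month: int, delta: int) -> str:
--     idx = month + delta - 1
--     return f"{year + idx // 12}{idx % 12 + 1:02d}"
-- ===== Notes on version B (the rewrite author's own statement) =====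
-- stated objective: faster
-- what changed: Replaces the two normalization while-loops (O(|delta|/12) iterations) with a single closed-form floor-division/modulo computation on the zero-based month index.
import Mathlib
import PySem

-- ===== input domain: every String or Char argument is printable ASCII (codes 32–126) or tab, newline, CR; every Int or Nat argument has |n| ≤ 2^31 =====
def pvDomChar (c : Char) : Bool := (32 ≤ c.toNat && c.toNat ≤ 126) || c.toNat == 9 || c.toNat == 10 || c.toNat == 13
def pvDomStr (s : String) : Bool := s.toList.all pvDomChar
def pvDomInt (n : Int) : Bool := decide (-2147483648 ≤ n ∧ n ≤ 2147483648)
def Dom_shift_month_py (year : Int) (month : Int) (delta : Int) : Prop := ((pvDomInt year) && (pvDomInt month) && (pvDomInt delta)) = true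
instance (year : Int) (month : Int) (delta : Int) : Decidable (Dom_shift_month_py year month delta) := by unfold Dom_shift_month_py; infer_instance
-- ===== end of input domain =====

-- B replaces A's two month-normalization while-loops with one closed-form floordiv/mod computation (simpler, no loops).


-- ===== PORT A =====
-- while m <= 0: m += 12; y -= 1
def shiftLoop1 (y m : Int) : Int × Int :=
  if m ≤ 0 then shiftLoop1 (y - 1) (m + 12) else (y, m)
termination_by (1 - m).toNat
decreasing_by omega

-- while m > 12: m -= 12; y += 1
def shiftLoop2 (y m : Int) : Int × Int :=
  if m > 12 then shiftLoop2 (y + 1) (m - 12) else (y, m)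
termination_by m.toNat
decreasing_by omega

def shift_month_py (year : Int) (month : Int) (delta : Int) : String :=
  let p1 := shiftLoop1 year (month + delta)
  let p2 := shiftLoop2 p1.1 p1.2
  -- f"{y}{m:02d}"
  PySem.Int.toStr p2.1 ++ PySem.Str.zfill (PySem.Int.toStr p2.2) 2

-- ===== PORT B =====
def shift_month_py_alt (year : Int) (month : Int) (delta : Int) : String :=
  let idx := month + delta - 1
  -- f"{year + idx // 12}{idx % 12 + 1:02d}"
  PySem.Int.toStr (year + PySem.Int.floordiv idx 12) ++
    PySem.Str.zfill (PySem.Int.toStr (PySem.Int.mod idx 12 + 1)) 2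

-- ===== PRECONDITION & SPEC =====
def Spec_shift_month_py (year : Int) (month : Int) (delta : Int) (out : String) : Prop := out = shift_month_py_alt year month delta
instance (year : Int) (month : Int) (delta : Int) (out : String) : Decidable (Spec_shift_month_py year month delta out) := by unfold Spec_shift_month_py; infer_instance

-- ===== CLAIM (what is proved, stated in full; the proofs are below) =====
def Claim_equal_shift_month_py : Prop := ∀ (year : Int) (month : Int) (delta : Int), Dom_shift_month_py year month delta → Spec_shift_month_py year month delta (shift_month_py year month delta)

-- ===== LEMMAS AND PROOFS =====
lemma shiftLoop1_spec (y m : Int) :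
    12 * (shiftLoop1 y m).1 + (shiftLoop1 y m).2 = 12 * y + m ∧
    0 < (shiftLoop1 y m).2 := by
  fun_induction shiftLoop1 y m with
  | case1 y m h ih => omega
  | case2 y m h => simp; omega

lemma shiftLoop2_spec (y m : Int) (hm : 0 < m) :
    12 * (shiftLoop2 y m).1 + (shiftLoop2 y m).2 = 12 * y + m ∧
    0 < (shiftLoop2 y m).2 ∧ (shiftLoop2 y m).2 ≤ 12 := by
  fun_induction shiftLoop2 y m with
  | case1 y m h ih =>
      have := ih (by omega)
      omega
  | case2 y m h => simp; omega

theorem shift_month_py_spec : Claim_equal_shift_month_py := by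
  intro year month delta _
  unfold Spec_shift_month_py shift_month_py shift_month_py_alt
  dsimp only
  have h1 := shiftLoop1_spec year (month + delta)
  have h2 := shiftLoop2_spec (shiftLoop1 year (month + delta)).1
      (shiftLoop1 year (month + delta)).2 h1.2
  rw [PySem.Int.floordiv_eq_ediv_of_pos (by omega : (0:Int) < 12),
      PySem.Int.mod_eq_emod_of_pos (by omega : (0:Int) < 12)]
  have hy : (shiftLoop2 (shiftLoop1 year (month + delta)).1 (shiftLoop1 year (month + delta)).2).1
      = year + (month + delta - 1) / 12 := by omega
  have hm : (shiftLoop2 (shiftLoop1 year (month + delta)).1 (shiftLoop1 year (month + delta)).2).2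
      = (month + delta - 1) % 12 + 1 := by omega
  simp only [hy, hm]
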